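-- pv_equiv track=rewrite | github.com/pppa2019/situation_puzzle | utils/load_kg_from_ann.py | convert_KG2PathSent
-- ===== SOURCE A (Python) =====
-- def convert_KG2PathSent(span_dict, relation_dict, event_dict):
--     def abbr_projector(item_name):
--         abbr = item_name.split(':')[-1]
--         if abbr[0]=='T':
--             return span_dict[abbr][-1]
--         else:
--             return abbr_projector(event_dict[abbr][0])
--     path_sents = []
--
--     for item in relation_dict.values():
--         path_sents.append(abbr_projector(item[-2])+'[SEP]'+abbr_projector(item[-1]))
--
--     for item in event_dict.values():
--         path_sents.append('[SEP]'.join([abbr_projector(name) for name in item]))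
--
--     return path_sents
-- ===== SOURCE B (Python) =====
-- def convert_KG2PathSent(span_dict, relation_dict, event_dict):
--     # Pass 1: dynamic-programming table mapping each event id to its resolved span
--     # word, built by fixpoint rounds over the parent references (no per-use chain walk).
--     res = {}
--     for _ in range(len(event_dict)):
--         for k, v in event_dict.items():
--             if k in res or not v:
--                 continue
--             p = v[0].split(':')[-1]
--             if p.startswith('T'):
--                 if p in span_dict and span_dict[p]:
--                     res[k] = span_dict[p][-1]
--             elif p in res:
--                 res[k] = res[p]
--
--     def resolve(name):
--         abbr = name.split(':')[-1]
--         return span_dict[abbr][-1] if abbr.startswith('T') else res[abbr]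
--
--     out = ['[SEP]'.join([resolve(item[-2]), resolve(item[-1])])
--            for item in relation_dict.values()]
--     out += ['[SEP]'.join(resolve(n) for n in item) for item in event_dict.values()]
--     return out
-- ===== Notes on version B (the rewrite author's own statement) =====
-- stated objective: alternative
-- what changed: A resolves every reference by walking the event parent chain recursively at each use; B first builds a table mapping every event id to its resolved span word by fixpoint rounds over event_dict (dynamic programming), then both output passes become plain comprehensions doing a single table/span lookup per name.
import Mathlib
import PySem

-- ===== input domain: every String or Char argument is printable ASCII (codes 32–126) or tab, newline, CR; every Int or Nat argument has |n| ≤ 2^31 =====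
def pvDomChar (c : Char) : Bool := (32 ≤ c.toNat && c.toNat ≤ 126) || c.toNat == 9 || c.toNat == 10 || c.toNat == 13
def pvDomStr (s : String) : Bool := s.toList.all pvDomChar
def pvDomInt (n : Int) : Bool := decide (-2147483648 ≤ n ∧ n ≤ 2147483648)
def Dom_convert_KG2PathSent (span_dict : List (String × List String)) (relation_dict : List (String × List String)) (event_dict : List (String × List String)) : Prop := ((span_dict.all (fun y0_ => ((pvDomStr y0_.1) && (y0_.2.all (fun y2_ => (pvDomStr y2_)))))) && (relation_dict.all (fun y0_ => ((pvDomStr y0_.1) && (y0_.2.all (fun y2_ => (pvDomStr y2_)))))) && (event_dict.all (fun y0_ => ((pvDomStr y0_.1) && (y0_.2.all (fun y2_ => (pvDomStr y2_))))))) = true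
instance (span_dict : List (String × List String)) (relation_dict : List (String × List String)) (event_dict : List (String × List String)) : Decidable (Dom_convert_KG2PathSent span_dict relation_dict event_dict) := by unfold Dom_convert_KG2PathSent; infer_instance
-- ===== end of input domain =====

-- B replaces A's per-reference recursive chain walk by a table of resolved event ids built
-- once by fixpoint rounds, then plain lookups; return value only, no argument is mutated.

-- shared helper: name.split(':')[-1]  (split(':') is never empty, so the [-1] never raises)
def pvSplitLast (s : String) : String :=
  PySem.List.pyGetD ((PySem.Str.split? s ":").getD []) (-1) ""

-- ===== PORT A =====
-- abbr_projector, recursive as in A; fuel bounds the recursion depth ('none' = Python raises,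
-- excluded by Pre_; Option.bind propagates the raise)
def pvProjA (span_dict event_dict : List (String × List String)) :
    Nat → String → Option String
  | 0, _ => none
  | fuel+1, item_name =>
    let abbr := pvSplitLast item_name
    (PySem.Str.pyGet? abbr 0).bind fun c =>
      if c = 'T' then
        ((PySem.Dict.ofList span_dict).get? abbr).bind fun ws =>
          PySem.List.pyGet? ws (-1)
      else
        ((PySem.Dict.ofList event_dict).get? abbr).bind fun args =>
          (PySem.List.pyGet? args 0).bind fun nm =>
            pvProjA span_dict event_dict fuel nm

def convert_KG2PathSent (span_dict : List (String × List String)) (relation_dict : List (String × List String)) (event_dict : List (String × List String)) : List String :=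
  let fuel := (PySem.Dict.ofList event_dict).size + 2
  let path_sents := (PySem.Dict.ofList relation_dict).values.foldl
    (fun acc item =>
      acc ++ [((pvProjA span_dict event_dict fuel (PySem.List.pyGetD item (-2) "")).getD "")
              ++ "[SEP]"
              ++ ((pvProjA span_dict event_dict fuel (PySem.List.pyGetD item (-1) "")).getD "")]) []
  (PySem.Dict.ofList event_dict).values.foldl
    (fun acc item =>
      acc ++ [PySem.Str.join "[SEP]"
        (item.map (fun nm => (pvProjA span_dict event_dict fuel nm).getD ""))]) path_sents

-- ===== PORT B =====
-- the body of B's inner table-building loop over event_dict.items()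
def pvStepB (span_dict : List (String × List String))
    (res : PySem.Dict String String) (kv : String × List String) : PySem.Dict String String :=
  if (res.get? kv.1).isSome then res
  else
    match kv.2 with
    | [] => res
    | v0 :: _ =>
      if PySem.Str.startswith (pvSplitLast v0) "T" then
        match (PySem.Dict.ofList span_dict).get? (pvSplitLast v0) with
        | some ws => if ws.isEmpty then res else res.insert kv.1 (PySem.List.pyGetD ws (-1) "")
        | none => res
      else
        match res.get? (pvSplitLast v0) with
        | some w => res.insert kv.1 w
        | none => res

-- elimination forms of pvResolvable (n+1)

-- one round of B's fixpoint pass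
def pvRoundB (span_dict event_dict : List (String × List String))
    (res0 : PySem.Dict String String) : PySem.Dict String String :=
  (PySem.Dict.ofList event_dict).items.foldl (pvStepB span_dict) res0

-- 'for _ in range(len(event_dict)): …'
def pvTableB (span_dict event_dict : List (String × List String)) : PySem.Dict String String :=
  (List.range (PySem.Dict.ofList event_dict).size).foldl
    (fun res _ => pvRoundB span_dict event_dict res) PySem.Dict.empty

def pvResolveB (span_dict : List (String × List String))
    (res : PySem.Dict String String) (name : String) : String :=
  let abbr := pvSplitLast name
  if PySem.Str.startswith abbr "T" then
    PySem.List.pyGetD (((PySem.Dict.ofList span_dict).get? abbr).getD []) (-1) ""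
  else (res.get? abbr).getD ""

def convert_KG2PathSent_alt (span_dict : List (String × List String)) (relation_dict : List (String × List String)) (event_dict : List (String × List String)) : List String :=
  let res := pvTableB span_dict event_dict
  ((PySem.Dict.ofList relation_dict).values.map (fun item =>
      PySem.Str.join "[SEP]"
        [pvResolveB span_dict res (PySem.List.pyGetD item (-2) ""),
         pvResolveB span_dict res (PySem.List.pyGetD item (-1) "")]))
  ++ ((PySem.Dict.ofList event_dict).values.map (fun item =>
      PySem.Str.join "[SEP]" (item.map (pvResolveB span_dict res))))

-- ===== PRECONDITION & SPEC =====
-- the abbreviation a resolves through the input's reference graph within n steps: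
-- a chain of event ids ending at a 'T' id with a nonempty span entry
def pvResolvable (span_dict event_dict : List (String × List String)) : Nat → String → Bool
  | 0, _ => false
  | n+1, a =>
    match PySem.Str.pyGet? a 0 with
    | none => false
    | some c =>
      if c = 'T' then
        match (PySem.Dict.ofList span_dict).get? a with
        | some ws => !ws.isEmpty
        | none => false
      else
        match (PySem.Dict.ofList event_dict).get? a with
        | none => false
        | some v =>
          match PySem.List.pyGet? v 0 with
          | none => false
          | some nm => pvResolvable span_dict event_dict n (pvSplitLast nm)

-- Pre_ holds exactly where the Python A returns: every referenced name's chain reaches a 'T' id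
-- with a nonempty span entry without a missing key / empty name / cycle (a terminating chain
-- visits distinct event ids, so depth len(event_dict)+1 is no restriction), and every relation
-- value has at least the two referenced slots.  Nothing A returns on is excluded.
def Pre_convert_KG2PathSent (span_dict : List (String × List String)) (relation_dict : List (String × List String)) (event_dict : List (String × List String)) : Prop :=
  (((PySem.Dict.ofList relation_dict).values.all (fun v =>
      decide (2 ≤ v.length)
      && pvResolvable span_dict event_dict ((PySem.Dict.ofList event_dict).size + 1)
           (pvSplitLast (PySem.List.pyGetD v (-2) ""))
      && pvResolvable span_dict event_dict ((PySem.Dict.ofList event_dict).size + 1)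
           (pvSplitLast (PySem.List.pyGetD v (-1) ""))))
   && ((PySem.Dict.ofList event_dict).values.all (fun v =>
      v.all (fun nm => pvResolvable span_dict event_dict ((PySem.Dict.ofList event_dict).size + 1)
           (pvSplitLast nm))))) = true

instance (span_dict : List (String × List String)) (relation_dict : List (String × List String)) (event_dict : List (String × List String)) : Decidable (Pre_convert_KG2PathSent span_dict relation_dict event_dict) := by unfold Pre_convert_KG2PathSent; infer_instance

def pvWitness_convert_KG2PathSent : (List (String × List String)) × (List (String × List String)) × (List (String × List String)) :=
  ([("T1", ["man", "dies"])], [("R1", ["Arg1:T1", "Arg2:E1"])], [("E1", ["Etype:E2"]), ("E2", ["Th:T1"])])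

def Spec_convert_KG2PathSent (span_dict : List (String × List String)) (relation_dict : List (String × List String)) (event_dict : List (String × List String)) (out : List String) : Prop := out = convert_KG2PathSent_alt span_dict relation_dict event_dict
instance (span_dict : List (String × List String)) (relation_dict : List (String × List String)) (event_dict : List (String × List String)) (out : List String) : Decidable (Spec_convert_KG2PathSent span_dict relation_dict event_dict out) := by unfold Spec_convert_KG2PathSent; infer_instance

-- ===== CLAIM (what is proved, stated in full; the proofs are below) =====
def Claim_equal_convert_KG2PathSent : Prop := ∀ (span_dict : List (String × List String)) (relation_dict : List (String × List String)) (event_dict : List (String × List String)), Dom_convert_KG2PathSent span_dict relation_dict event_dict → Pre_convert_KG2PathSent span_dict relation_dict event_dict → Spec_convert_KG2PathSent span_dict relation_dict event_dict (convert_KG2PathSent span_dict relation_dict event_dict)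

-- ===== LEMMAS AND PROOFS =====

-- proof-side value of A's projector as a function of the abbreviation
def pvValA (span_dict event_dict : List (String × List String)) : Nat → String → Option String
  | 0, _ => none
  | fuel+1, a =>
    (PySem.Str.pyGet? a 0).bind fun c =>
      if c = 'T' then
        ((PySem.Dict.ofList span_dict).get? a).bind fun ws =>
          PySem.List.pyGet? ws (-1)
      else
        ((PySem.Dict.ofList event_dict).get? a).bind fun v =>
          (PySem.List.pyGet? v 0).bind fun nm =>
            pvValA span_dict event_dict fuel (pvSplitLast nm)

-- table invariant: every recorded non-'T' key that resolves carries A's value for it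
def pvSound (sd ed : List (String × List String)) (res : PySem.Dict String String) : Prop :=
  ∀ k w c, res.get? k = some w → PySem.Chars.pyGet? k.toList 0 = some c → c ≠ 'T' →
    pvResolvable sd ed ((PySem.Dict.ofList ed).size + 1) k = true →
    pvValA sd ed ((PySem.Dict.ofList ed).size + 2) k = some w

lemma pv_projA_eq_valA (sd ed : List (String × List String)) :
    ∀ f n, pvProjA sd ed f n = pvValA sd ed f (pvSplitLast n) := by
  intro f
  induction f with
  | zero => intro n; rfl
  | succ f ih =>
    intro n
    rw [pvProjA, pvValA]
    refine congrArg _ (funext fun c => ?_)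
    split_ifs with hc
    · rfl
    · refine congrArg _ (funext fun v => ?_)
      refine congrArg _ (funext fun nm => ?_)
      exact ih nm

lemma pv_resolvable_mono (sd ed : List (String × List String)) :
    ∀ m a, pvResolvable sd ed m a = true → ∀ j, m ≤ j → pvResolvable sd ed j a = true := by
  intro m
  induction m with
  | zero => intro a h; simp [pvResolvable] at h
  | succ m ih =>
    intro a h j hj
    obtain ⟨j, rfl⟩ : ∃ j', j = j' + 1 := ⟨j - 1, by omega⟩
    rw [pvResolvable] at h ⊢
    simp only [PySem.Str.pyGet?_eq] at h ⊢
    cases hg : PySem.Chars.pyGet? a.toList 0 with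
    | none => rw [hg] at h; cases h
    | some c =>
      simp only [hg] at h ⊢
      by_cases hc : c = 'T'
      · rw [if_pos hc] at h ⊢; exact h
      · rw [if_neg hc] at h ⊢
        cases he : (PySem.Dict.ofList ed).get? a with
        | none => rw [he] at h; cases h
        | some v =>
          simp only [he] at h ⊢
          cases hv : PySem.List.pyGet? v 0 with
          | none => rw [hv] at h; cases h
          | some nm =>
            simp only [hv] at h ⊢
            exact ih _ h _ (by omega)

lemma pv_valA_stable (sd ed : List (String × List String)) :
    ∀ m a, pvResolvable sd ed m a = true →
      ∀ j, m ≤ j → pvValA sd ed j a = pvValA sd ed m a ∧ (pvValA sd ed m a).isSome := by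
  intro m
  induction m with
  | zero => intro a h; simp [pvResolvable] at h
  | succ m ih =>
    intro a h j hj
    obtain ⟨j, rfl⟩ : ∃ j', j = j' + 1 := ⟨j - 1, by omega⟩
    rw [pvResolvable] at h
    rw [pvValA, pvValA]
    simp only [PySem.Str.pyGet?_eq] at h ⊢
    cases hg : PySem.Chars.pyGet? a.toList 0 with
    | none => rw [hg] at h; cases h
    | some c =>
      simp only [hg] at h ⊢
      simp only [Option.bind_some]
      by_cases hc : c = 'T'
      · rw [if_pos hc] at h ⊢
        rw [if_pos hc]
        refine ⟨rfl, ?_⟩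
        cases hs : (PySem.Dict.ofList sd).get? a with
        | none => rw [hs] at h; cases h
        | some ws =>
          simp only [hs, Option.bind_some] at h ⊢
          cases ws with
          | nil => simp at h
          | cons w ws' => simp [PySem.List.pyGet?_neg_one]
      · rw [if_neg hc] at h ⊢
        rw [if_neg hc]
        cases he : (PySem.Dict.ofList ed).get? a with
        | none => rw [he] at h; cases h
        | some v =>
          simp only [he, Option.bind_some] at h ⊢
          cases hv : PySem.List.pyGet? v 0 with
          | none => rw [hv] at h; cases h
          | some nm =>
            simp only [hv, Option.bind_some] at h ⊢
            exact ih _ h _ (by omega)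

lemma pv_startswith_T {a : String} {c : Char} (h : PySem.Str.pyGet? a 0 = some c) :
    PySem.Str.startswith a "T" = (c == 'T') := by
  rw [PySem.Str.startswith_eq]
  rw [PySem.Str.pyGet?_eq] at h
  cases hl : a.toList with
  | nil => rw [hl] at h; simp [PySem.Chars.pyGet?, PySem.List.pyGet?] at h
  | cons x xs =>
    rw [hl] at h
    have hx : x = c := by
      simp [PySem.Chars.pyGet?, PySem.List.pyGet?, PySem.List.pyIdx?] at h
      exact h
    rw [← hx]
    by_cases hc : x = 'T'
    · subst hc
      have ht : PySem.Chars.startswith ('T' :: xs) "T".toList = true := by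
        rw [PySem.Chars.startswith_iff]
        exact ⟨xs, rfl⟩
      simpa using ht
    · have hf : ¬ PySem.Chars.startswith (x :: xs) "T".toList = true := by
        rw [PySem.Chars.startswith_iff]
        rintro ⟨t, ht⟩
        have h1 : "T".toList = ['T'] := rfl
        rw [h1] at ht
        simp at ht
        exact hc ht.1.symm
      have hf2 : PySem.Chars.startswith (x :: xs) ['T'] = false := by
        simpa using Bool.eq_false_iff.mpr hf
      simp [hf2, hc]

lemma pv_res_head {sd ed : List (String × List String)} {n : Nat} {a : String}
    (h : pvResolvable sd ed (n+1) a = true) : ∃ c, PySem.Chars.pyGet? a.toList 0 = some c := by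
  rw [pvResolvable] at h
  simp only [PySem.Str.pyGet?_eq] at h
  cases hg : PySem.Chars.pyGet? a.toList 0 with
  | none => rw [hg] at h; cases h
  | some c => exact ⟨c, rfl⟩

lemma pv_res_elim_T {sd ed : List (String × List String)} {n : Nat} {a : String}
    (h : pvResolvable sd ed (n+1) a = true)
    (hg : PySem.Chars.pyGet? a.toList 0 = some 'T') :
    ∃ ws, (PySem.Dict.ofList sd).get? a = some ws ∧ ws ≠ [] := by
  rw [pvResolvable] at h
  simp only [PySem.Str.pyGet?_eq, hg] at h
  cases hs : (PySem.Dict.ofList sd).get? a with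
  | none => rw [hs] at h; cases h
  | some ws =>
    simp only [hs] at h
    refine ⟨ws, rfl, ?_⟩
    intro hnil
    subst hnil
    simp at h

lemma pv_res_elim_nonT {sd ed : List (String × List String)} {n : Nat} {a : String} {c : Char}
    (h : pvResolvable sd ed (n+1) a = true)
    (hg : PySem.Chars.pyGet? a.toList 0 = some c) (hc : c ≠ 'T') :
    ∃ v nm, (PySem.Dict.ofList ed).get? a = some v ∧ PySem.List.pyGet? v 0 = some nm ∧
      pvResolvable sd ed n (pvSplitLast nm) = true := by
  rw [pvResolvable] at h
  simp only [PySem.Str.pyGet?_eq, hg, if_neg hc] at h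
  cases he : (PySem.Dict.ofList ed).get? a with
  | none => rw [he] at h; cases h
  | some v =>
    simp only [he] at h
    cases hv : PySem.List.pyGet? v 0 with
    | none => rw [hv] at h; cases h
    | some nm =>
      rw [hv] at h
      exact ⟨v, nm, rfl, hv, h⟩

-- computation forms of pvValA (f+1)
lemma pv_valA_succ_T {sd ed : List (String × List String)} {f : Nat} {a : String}
    (hg : PySem.Chars.pyGet? a.toList 0 = some 'T') :
    pvValA sd ed (f+1) a = ((PySem.Dict.ofList sd).get? a).bind fun ws => PySem.List.pyGet? ws (-1) := by
  rw [pvValA]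
  simp only [PySem.Str.pyGet?_eq, hg, Option.bind_some, if_pos]

lemma pv_valA_succ_nonT {sd ed : List (String × List String)} {f : Nat} {a : String} {c : Char}
    {v : List String} {nm : String}
    (hg : PySem.Chars.pyGet? a.toList 0 = some c) (hc : c ≠ 'T')
    (he : (PySem.Dict.ofList ed).get? a = some v) (hv : PySem.List.pyGet? v 0 = some nm) :
    pvValA sd ed (f+1) a = pvValA sd ed f (pvSplitLast nm) := by
  rw [pvValA]
  simp only [PySem.Str.pyGet?_eq, hg, Option.bind_some, if_neg hc, he, hv]

lemma pv_head_of_startswith {p : String} (h : PySem.Str.startswith p "T" = true) :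
    PySem.Chars.pyGet? p.toList 0 = some 'T' := by
  rw [PySem.Str.startswith_eq, PySem.Chars.startswith_iff] at h
  obtain ⟨t, ht⟩ := h
  have : p.toList = 'T' :: t := by simpa using ht.symm
  simp [this]

lemma pv_insert_isSome {res : PySem.Dict String String} {k k' : String} {w : String}
    (h : (res.get? k').isSome) : ((res.insert k w).get? k').isSome := by
  rw [PySem.Dict.get?_insert]
  split <;> simp [h]

lemma pv_step_mono {sd : List (String × List String)} {res : PySem.Dict String String}
    {kv : String × List String} {k : String}
    (h : (res.get? k).isSome) : ((pvStepB sd res kv).get? k).isSome := by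
  unfold pvStepB
  split
  · exact h
  · split
    · exact h
    · split
      · split
        · split
          · exact h
          · exact pv_insert_isSome h
        · exact h
      · split
        · exact pv_insert_isSome h
        · exact h

lemma pv_fold_mono {sd : List (String × List String)} {k : String} :
    ∀ (l : List (String × List String)) (res : PySem.Dict String String),
      (res.get? k).isSome → ((l.foldl (pvStepB sd) res).get? k).isSome := by
  intro l
  induction l with
  | nil => intro res h; exact h
  | cons b t ih => intro res h; exact ih _ (pv_step_mono h)

lemma pv_step_sound (sd ed : List (String × List String)) (res : PySem.Dict String String)
    (kv : String × List String) (hkv : kv ∈ (PySem.Dict.ofList ed).items)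
    (hs : pvSound sd ed res) : pvSound sd ed (pvStepB sd res kv) := by
  intro k w c hk hc hcT hres
  have hget : (PySem.Dict.ofList ed).get? kv.1 = some kv.2 :=
    PySem.Dict.get?_of_mem_items _ (by simpa using hkv) (PySem.Dict.nodup_keys_ofList ed)
  unfold pvStepB at hk
  split at hk
  · exact hs k w c hk hc hcT hres
  · split at hk
    · exact hs k w c hk hc hcT hres
    next v0 vs hv2 =>
      split at hk
      next hsw =>
        -- parent starts with 'T'
        split at hk
        next ws hws =>
          split at hk
          · exact hs k w c hk hc hcT hres
          next hemp =>
            rw [PySem.Dict.get?_insert] at hk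
            by_cases hkk : k = kv.1
            · rw [if_pos hkk] at hk
              obtain ⟨v, nm, he, hv, hr⟩ := pv_res_elim_nonT hres hc hcT
              rw [hkk, hget] at he
              have hv' : v = kv.2 := (Option.some_inj.mp he).symm
              subst hv'
              rw [hv2] at hv
              rw [PySem.List.pyGet?_zero_cons] at hv
              have hnm : nm = v0 := (Option.some_inj.mp hv).symm
              rw [hnm] at hr
              have hstep : ((PySem.Dict.ofList ed).size + 2) = ((PySem.Dict.ofList ed).size + 1) + 1 := rfl
              have heK : (PySem.Dict.ofList ed).get? k = some (v0 :: vs) := by rw [hkk, hget, hv2]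
              rw [hstep, pv_valA_succ_nonT hc hcT heK (PySem.List.pyGet?_zero_cons ..)]
              rw [pv_valA_succ_T (pv_head_of_startswith hsw)]
              rw [hws]
              have hwsne : ws ≠ [] := by simpa using hemp
              simp only [Option.bind_some, PySem.List.pyGet?_neg_one,
                List.getLast?_eq_some_getLast hwsne]
              rw [← hk, PySem.List.pyGetD_neg_one ws "" hwsne]
            · rw [if_neg hkk] at hk
              exact hs k w c hk hc hcT hres
        · exact hs k w c hk hc hcT hres
      next hsw =>
        -- parent is an event id
        split at hk
        next w' hw' =>
          rw [PySem.Dict.get?_insert] at hk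
          by_cases hkk : k = kv.1
          · rw [if_pos hkk] at hk
            have hww : w = w' := (Option.some_inj.mp hk).symm
            subst hww
            obtain ⟨v, nm, he, hv, hr⟩ := pv_res_elim_nonT hres hc hcT
            rw [hkk, hget] at he
            have hv' : v = kv.2 := (Option.some_inj.mp he).symm
            subst hv'
            rw [hv2, PySem.List.pyGet?_zero_cons] at hv
            have hnm : nm = v0 := (Option.some_inj.mp hv).symm
            rw [hnm] at hr
            -- head of parent p, not 'T'
            have hS : ∃ S', (PySem.Dict.ofList ed).size = S' + 1 := by
              rcases Nat.eq_zero_or_pos (PySem.Dict.ofList ed).size with h0 | h0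
              · rw [h0] at hr; cases hr
              · exact ⟨(PySem.Dict.ofList ed).size - 1, by omega⟩
            obtain ⟨S', hS⟩ := hS
            obtain ⟨c', hc'⟩ := pv_res_head (hS ▸ hr)
            have hcT' : c' ≠ 'T' := by
              intro hEq
              rw [pv_startswith_T (by rw [PySem.Str.pyGet?_eq]; exact hc')] at hsw
              simp [hEq] at hsw
            have hresp : pvResolvable sd ed ((PySem.Dict.ofList ed).size + 1) (pvSplitLast v0) = true :=
              pv_resolvable_mono sd ed _ _ hr _ (by omega)
            have hvp := hs (pvSplitLast v0) w c' hw' hc' hcT' hresp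
            have hst := pv_valA_stable sd ed _ _ hr
            have h1 := (hst ((PySem.Dict.ofList ed).size + 2) (by omega)).1
            have h2 := (hst ((PySem.Dict.ofList ed).size + 1) (by omega)).1
            have hstep : ((PySem.Dict.ofList ed).size + 2) = ((PySem.Dict.ofList ed).size + 1) + 1 := rfl
            have heK : (PySem.Dict.ofList ed).get? k = some (v0 :: vs) := by rw [hkk, hget, hv2]
            rw [hstep, pv_valA_succ_nonT hc hcT heK (PySem.List.pyGet?_zero_cons ..)]
            rw [h2, ← h1]
            exact hvp
          · rw [if_neg hkk] at hk
            exact hs k w c hk hc hcT hres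
        · exact hs k w c hk hc hcT hres
lemma pv_fold_sound (sd ed : List (String × List String)) :
    ∀ (l : List (String × List String)) (res : PySem.Dict String String),
      (∀ kv ∈ l, kv ∈ (PySem.Dict.ofList ed).items) → pvSound sd ed res →
      pvSound sd ed (l.foldl (pvStepB sd) res) := by
  intro l
  induction l with
  | nil => intro res _ hs; exact hs
  | cons b t ih =>
    intro res hmem hs
    exact ih _ (fun kv hkv => hmem kv (List.mem_cons_of_mem _ hkv))
      (pv_step_sound sd ed res b (hmem b (List.mem_cons_self ..)) hs)

lemma pv_rounds_sound (sd ed : List (String × List String)) :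
    ∀ n, pvSound sd ed ((List.range n).foldl (fun res _ => pvRoundB sd ed res) PySem.Dict.empty) := by
  intro n
  induction n with
  | zero =>
    intro k w c hk
    simp only [List.range_zero, List.foldl_nil] at hk
    rw [PySem.Dict.get?_empty] at hk
    cases hk
  | succ n ih =>
    rw [List.range_succ, List.foldl_append]
    exact pv_fold_sound sd ed _ _ (fun kv hkv => hkv) ih

lemma pv_hit (sd : List (String × List String)) (a : String) (v0 : String) (vs : List String)
    (sp : PySem.Dict String String → Prop)
    (hsp : ∀ res, sp res →
      (PySem.Str.startswith (pvSplitLast v0) "T" = true ∧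
        ∃ ws, (PySem.Dict.ofList sd).get? (pvSplitLast v0) = some ws ∧ ¬ws.isEmpty = true) ∨
      (PySem.Str.startswith (pvSplitLast v0) "T" = false ∧ (res.get? (pvSplitLast v0)).isSome))
    (hstep_sp : ∀ res kv, sp res → sp (pvStepB sd res kv)) :
    ∀ (l : List (String × List String)) (res : PySem.Dict String String),
      (a, v0 :: vs) ∈ l → sp res → ((l.foldl (pvStepB sd) res).get? a).isSome := by
  intro l
  induction l with
  | nil => intro res h; cases h
  | cons b t ih =>
    intro res hmem hsp0
    rcases List.mem_cons.mp hmem with hb | ht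
    · -- the fold reaches (a, v0 :: vs) now
      subst hb
      rw [List.foldl_cons]
      apply pv_fold_mono
      by_cases hpres : ((res.get? a).isSome : Prop)
      · unfold pvStepB
        simp only
        rw [if_pos hpres]
        exact hpres
      · unfold pvStepB
        simp only
        rw [if_neg hpres]
        rcases hsp res hsp0 with ⟨hT, ws, hws, hne⟩ | ⟨hF, hS⟩
        · rw [if_pos hT]
          simp only [hws]
          rw [if_neg (by simpa using hne)]
          rw [PySem.Dict.get?_insert, if_pos rfl]
          rfl
        · rw [if_neg (by rw [PySem.Str.startswith_eq] at hF; simp only [show ("T".toList) = ['T'] from rfl] at hF; simp [hF])]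
          cases hg : res.get? (pvSplitLast v0) with
          | none => rw [hg] at hS; cases hS
          | some w =>
            rw [PySem.Dict.get?_insert, if_pos rfl]
            rfl
    · exact ih _ ht (hstep_sp res b hsp0)
lemma pv_complete (sd ed : List (String × List String)) :
    ∀ (m : Nat) (a : String) (c : Char), pvResolvable sd ed (m+1) a = true →
      PySem.Chars.pyGet? a.toList 0 = some c → c ≠ 'T' →
      (((List.range m).foldl (fun res _ => pvRoundB sd ed res) PySem.Dict.empty).get? a).isSome := by
  intro m
  induction m with
  | zero =>
    intro a c h hc hcT
    obtain ⟨v, nm, he, hv, hr⟩ := pv_res_elim_nonT h hc hcT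
    rw [pvResolvable] at hr
    cases hr
  | succ m ih =>
    intro a c h hc hcT
    rw [List.range_succ, List.foldl_append, List.foldl_cons, List.foldl_nil]
    obtain ⟨v, nm, he, hv, hr⟩ := pv_res_elim_nonT h hc hcT
    obtain ⟨vs, hv2⟩ : ∃ vs, v = nm :: vs := by
      cases v with
      | nil => simp [PySem.List.pyGet?] at hv
      | cons x xs =>
        rw [PySem.List.pyGet?_zero_cons] at hv
        exact ⟨xs, by rw [Option.some_inj.mp hv]⟩
    have hmem : (a, nm :: vs) ∈ (PySem.Dict.ofList ed).items :=
      PySem.Dict.mem_items_of_get?_eq_some _ (hv2 ▸ he)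
    -- the parent's head decides which disjunct pv_hit gets
    obtain ⟨c', hc'⟩ := pv_res_head hr
    show ((pvRoundB sd ed _).get? a).isSome
    unfold pvRoundB
    by_cases hcT' : c' = 'T'
    · obtain ⟨ws, hws, hwsne⟩ := pv_res_elim_T hr (hcT' ▸ hc')
      refine pv_hit sd a nm vs (fun _ => True) (fun res _ => Or.inl ?_) (fun _ _ _ => trivial)
        _ _ hmem trivial
      refine ⟨?_, ws, hws, by simpa using hwsne⟩
      rw [pv_startswith_T (by rw [PySem.Str.pyGet?_eq]; exact hc'), hcT']
      simp
    · have hpar := ih (pvSplitLast nm) c' hr hc' hcT'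
      refine pv_hit sd a nm vs
        (fun res => (res.get? (pvSplitLast nm)).isSome)
        (fun res hres => Or.inr ⟨?_, hres⟩)
        (fun res kv hres => pv_step_mono hres) _ _ hmem hpar
      rw [pv_startswith_T (by rw [PySem.Str.pyGet?_eq]; exact hc')]
      simp [hcT']

lemma pv_join_pair (s a b : String) : PySem.Str.join s [a, b] = a ++ s ++ b := by
  rw [String.append_assoc]
  simp [PySem.Str.join, PySem.Chars.join, List.intercalate, String.ofList]
  rfl

-- the core per-name fact: A's projector agrees with B's table lookup
lemma pv_resolve_eq (sd ed : List (String × List String)) (n : String)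
    (h : pvResolvable sd ed ((PySem.Dict.ofList ed).size + 1) (pvSplitLast n) = true) :
    (pvProjA sd ed ((PySem.Dict.ofList ed).size + 2) n).getD "" =
      pvResolveB sd (pvTableB sd ed) n := by
  rw [pv_projA_eq_valA]
  obtain ⟨c, hc⟩ := pv_res_head h
  unfold pvResolveB
  show (pvValA sd ed ((PySem.Dict.ofList ed).size + 2) (pvSplitLast n)).getD "" =
    (if PySem.Str.startswith (pvSplitLast n) "T" = true then
      PySem.List.pyGetD (((PySem.Dict.ofList sd).get? (pvSplitLast n)).getD []) (-1) ""
    else ((pvTableB sd ed).get? (pvSplitLast n)).getD "")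
  rw [pv_startswith_T (by rw [PySem.Str.pyGet?_eq]; exact hc)]
  have hstep : ((PySem.Dict.ofList ed).size + 2) = ((PySem.Dict.ofList ed).size + 1) + 1 := rfl
  by_cases hcT : c = 'T'
  · rw [if_pos (by simp [hcT])]
    obtain ⟨ws, hws, hwsne⟩ := pv_res_elim_T h (hcT ▸ hc)
    rw [hstep, pv_valA_succ_T (hcT ▸ hc), hws]
    simp only [Option.bind_some, PySem.List.pyGet?_neg_one, List.getLast?_eq_some_getLast hwsne,
      Option.getD_some]
    rw [PySem.List.pyGetD_neg_one ws "" hwsne]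
  · rw [if_neg (by simp [hcT])]
    have hcomp := pv_complete sd ed _ _ c h hc hcT
    cases hw : (pvTableB sd ed).get? (pvSplitLast n) with
    | none => unfold pvTableB at hw; rw [hw] at hcomp; cases hcomp
    | some w =>
      have hsound := pv_rounds_sound sd ed (PySem.Dict.ofList ed).size
        (pvSplitLast n) w c (by unfold pvTableB at hw; exact hw) hc hcT h
      rw [hsound]

-- ===== VERDICT (by name: the statement is the Claim_ definition above) =====
theorem convert_KG2PathSent_spec : Claim_equal_convert_KG2PathSent := by
  intro span_dict relation_dict event_dict _ hpre
  unfold Pre_convert_KG2PathSent at hpre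
  simp only [Bool.and_eq_true, List.all_eq_true, decide_eq_true_eq] at hpre
  obtain ⟨hrel, hev⟩ := hpre
  show convert_KG2PathSent span_dict relation_dict event_dict = _
  rw [convert_KG2PathSent, convert_KG2PathSent_alt]
  rw [PySem.List.foldl_append_singleton_eq_map
      (fun item => ((pvProjA span_dict event_dict ((PySem.Dict.ofList event_dict).size + 2) (PySem.List.pyGetD item (-2) "")).getD "")
              ++ "[SEP]"
              ++ ((pvProjA span_dict event_dict ((PySem.Dict.ofList event_dict).size + 2) (PySem.List.pyGetD item (-1) "")).getD "")),
    PySem.List.foldl_append_singleton_eq_map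
      (fun item => PySem.Str.join "[SEP]"
        (List.map (fun nm => (pvProjA span_dict event_dict ((PySem.Dict.ofList event_dict).size + 2) nm).getD "") item)),
    List.nil_append]
  refine congrArg₂ (· ++ ·) ?_ ?_
  · apply List.map_congr_left
    intro item hitem
    obtain ⟨⟨hlen, hn2⟩, hn1⟩ := hrel item hitem
    rw [pv_join_pair,
      ← pv_resolve_eq span_dict event_dict _ hn2,
      ← pv_resolve_eq span_dict event_dict _ hn1]
  · apply List.map_congr_left
    intro item hitem
    refine congrArg (PySem.Str.join "[SEP]") ?_
    apply List.map_congr_left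
    intro nm hnm
    rw [← pv_resolve_eq span_dict event_dict _ (hev item hitem nm hnm)]
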